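-- pv_equiv track=rewrite | github.com/Naikersz/Spiel | game/tilemap_pybsp.py | _rotate_mask
-- ===== SOURCE A (Python) =====
-- def _rotate_mask(mask: int, angle: int) -> int:
--     """
--     Поворачивает 8-битную Wang mask на угол (0, 1, 2, 3 для 0°, 90°, 180°, 270°)
--
--     Битмаска: N NE E SE S SW W NW (биты 0-7)
--     Поворот по часовой стрелке: N→E→S→W→N
--
--     Args:
--         mask: Исходная битмаска
--         angle: Угол поворота (0, 1, 2, 3)
--
--     Returns:
--         int: Повернутая битмаска
--     """
--     if angle == 0:
--         return mask
--
--     # Извлекаем биты для каждого направления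
--     # Исходный порядок: N(0), NE(1), E(2), SE(3), S(4), SW(5), W(6), NW(7)
--     bits = [
--         (mask >> 0) & 1,  # N
--         (mask >> 1) & 1,  # NE
--         (mask >> 2) & 1,  # E
--         (mask >> 3) & 1,  # SE
--         (mask >> 4) & 1,  # S
--         (mask >> 5) & 1,  # SW
--         (mask >> 6) & 1,  # W
--         (mask >> 7) & 1   # NW
--     ]
--
--     # Поворот на 90° по часовой стрелке: N→E, E→S, S→W, W→N
--     # Также поворачиваем диагонали: NE→SE, SE→SW, SW→NW, NW→NE
--     rotated_bits = [0] * 8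
--
--     if angle == 1:  # 90° по часовой
--         rotated_bits[0] = bits[6]  # N ← W
--         rotated_bits[1] = bits[7]  # NE ← NW
--         rotated_bits[2] = bits[0]  # E ← N
--         rotated_bits[3] = bits[1]  # SE ← NE
--         rotated_bits[4] = bits[2]  # S ← E
--         rotated_bits[5] = bits[3]  # SW ← SE
--         rotated_bits[6] = bits[4]  # W ← S
--         rotated_bits[7] = bits[5]  # NW ← SW
--     elif angle == 2:  # 180°
--         rotated_bits[0] = bits[4]  # N ← S
--         rotated_bits[1] = bits[5]  # NE ← SW
--         rotated_bits[2] = bits[6]  # E ← W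
--         rotated_bits[3] = bits[7]  # SE ← NW
--         rotated_bits[4] = bits[0]  # S ← N
--         rotated_bits[5] = bits[1]  # SW ← NE
--         rotated_bits[6] = bits[2]  # W ← E
--         rotated_bits[7] = bits[3]  # NW ← SE
--     elif angle == 3:  # 270° (90° против часовой)
--         rotated_bits[0] = bits[2]  # N ← E
--         rotated_bits[1] = bits[3]  # NE ← SE
--         rotated_bits[2] = bits[4]  # E ← S
--         rotated_bits[3] = bits[5]  # SE ← SW
--         rotated_bits[4] = bits[6]  # S ← W
--         rotated_bits[5] = bits[7]  # SW ← NW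
--         rotated_bits[6] = bits[0]  # W ← N
--         rotated_bits[7] = bits[1]  # NW ← NE
--
--     # Собираем новую маску
--     rotated_mask = 0
--     for i, bit in enumerate(rotated_bits):
--         if bit:
--             rotated_mask |= (1 << i)
--
--     return rotated_mask
-- ===== SOURCE B (Python) =====
-- def _rotate_mask(mask: int, angle: int) -> int:
--     if angle == 0:
--         return mask
--     if angle not in (1, 2, 3):
--         return 0
--     s = 2 * angle
--     m = mask % 256
--     return ((m << s) + (m >> (8 - s))) % 256
-- ===== Notes on version B (the rewrite author's own statement) =====
-- stated objective: simpler
-- what changed: Replaces A's 8-bit extraction, branch-selected permutation tables and bit-reassembly loop with a closed-form circular shift of the low byte ((m << 2*angle) + (m >> (8-2*angle))) % 256 with m = mask % 256, keeping angle==0 passthrough and 0 for angles outside 0-3.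
import Mathlib
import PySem

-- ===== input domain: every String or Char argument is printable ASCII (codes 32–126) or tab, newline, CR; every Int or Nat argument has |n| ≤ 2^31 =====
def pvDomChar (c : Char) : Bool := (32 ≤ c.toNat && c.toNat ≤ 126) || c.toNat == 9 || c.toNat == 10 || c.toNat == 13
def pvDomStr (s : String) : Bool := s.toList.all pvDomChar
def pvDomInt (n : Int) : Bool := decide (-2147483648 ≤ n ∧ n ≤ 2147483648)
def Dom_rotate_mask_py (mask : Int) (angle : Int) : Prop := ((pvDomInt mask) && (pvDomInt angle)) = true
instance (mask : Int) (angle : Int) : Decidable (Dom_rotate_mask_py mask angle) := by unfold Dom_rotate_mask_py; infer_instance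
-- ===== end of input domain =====

-- B replaces A's per-direction bit tables and reassembly loop by a closed-form rotate of the low byte: simpler, same values everywhere.


-- ===== PORT A =====
-- literal transliteration of Source A's _rotate_mask: extract 8 bits, select a permutation by branch
-- (each Python indexed assignment block becomes the resulting list literal), reassemble with a fold
def rotate_mask_py (mask : Int) (angle : Int) : Int :=
  if angle = 0 then mask
  else
    let bits : List Int :=
      [PySem.Int.band (mask >>> (0:Nat)) 1, PySem.Int.band (mask >>> (1:Nat)) 1,
       PySem.Int.band (mask >>> (2:Nat)) 1, PySem.Int.band (mask >>> (3:Nat)) 1,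
       PySem.Int.band (mask >>> (4:Nat)) 1, PySem.Int.band (mask >>> (5:Nat)) 1,
       PySem.Int.band (mask >>> (6:Nat)) 1, PySem.Int.band (mask >>> (7:Nat)) 1]
    let rotated_bits : List Int :=
      if angle = 1 then
        [bits.getD 6 0, bits.getD 7 0, bits.getD 0 0, bits.getD 1 0,
         bits.getD 2 0, bits.getD 3 0, bits.getD 4 0, bits.getD 5 0]
      else if angle = 2 then
        [bits.getD 4 0, bits.getD 5 0, bits.getD 6 0, bits.getD 7 0,
         bits.getD 0 0, bits.getD 1 0, bits.getD 2 0, bits.getD 3 0]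
      else if angle = 3 then
        [bits.getD 2 0, bits.getD 3 0, bits.getD 4 0, bits.getD 5 0,
         bits.getD 6 0, bits.getD 7 0, bits.getD 0 0, bits.getD 1 0]
      else [0, 0, 0, 0, 0, 0, 0, 0]
    (PySem.List.enumerate rotated_bits 0).foldl
      (fun (acc : Int) (p : Int × Int) => if p.2 ≠ 0 then PySem.Int.bor acc ((1:Int) <<< p.1) else acc) 0

-- ===== PORT B =====
-- literal transliteration of Source B: closed-form circular shift of the low byte
def rotate_mask_py_alt (mask : Int) (angle : Int) : Int :=
  if angle = 0 then mask
  else if angle = 1 ∨ angle = 2 ∨ angle = 3 then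
    let s : Nat := (2 * angle).toNat
    let m : Int := PySem.Int.mod mask 256
    PySem.Int.mod ((m <<< s) + (m >>> (8 - s))) 256
  else 0

-- ===== PRECONDITION & SPEC =====
def Spec_rotate_mask_py (mask : Int) (angle : Int) (out : Int) : Prop := out = rotate_mask_py_alt mask angle
instance (mask : Int) (angle : Int) (out : Int) : Decidable (Spec_rotate_mask_py mask angle out) := by unfold Spec_rotate_mask_py; infer_instance

-- ===== CLAIM (what is proved, stated in full; the proofs are below) =====
def Claim_equal_rotate_mask_py : Prop := ∀ (mask : Int) (angle : Int), Dom_rotate_mask_py mask angle → Spec_rotate_mask_py mask angle (rotate_mask_py mask angle)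

-- ===== LEMMAS AND PROOFS =====

-- both ports agree on every residue in [0, 256) at each rotating angle
set_option maxRecDepth 4096 in
theorem pv_key : ∀ n : Fin 256,
    rotate_mask_py (n.val : Int) 1 = rotate_mask_py_alt (n.val : Int) 1 ∧
    rotate_mask_py (n.val : Int) 2 = rotate_mask_py_alt (n.val : Int) 2 ∧
    rotate_mask_py (n.val : Int) 3 = rotate_mask_py_alt (n.val : Int) 3 := by
  decide

-- each extracted bit of mask equals the corresponding bit of mask % 256
theorem pv_bit (mask : Int) (k : Nat) (hk : k < 8) :
    PySem.Int.band (mask >>> k) 1 = PySem.Int.band ((mask % 256) >>> k) 1 := by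
  rw [PySem.Int.band_one, PySem.Int.band_one, Int.shiftRight_eq_div_pow,
      Int.shiftRight_eq_div_pow, PySem.Int.mod_eq_emod_of_pos (by norm_num),
      PySem.Int.mod_eq_emod_of_pos (by norm_num)]
  interval_cases k <;> norm_num <;> omega

-- A only reads the low 8 bits of mask (its bits depend on mask % 256 only)
theorem pv_modA (mask a : Int) (ha : ¬ a = 0) :
    rotate_mask_py mask a = rotate_mask_py (mask % 256) a := by
  simp only [rotate_mask_py, if_neg ha]
  rw [pv_bit mask 0 (by norm_num), pv_bit mask 1 (by norm_num), pv_bit mask 2 (by norm_num),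
      pv_bit mask 3 (by norm_num), pv_bit mask 4 (by norm_num), pv_bit mask 5 (by norm_num),
      pv_bit mask 6 (by norm_num), pv_bit mask 7 (by norm_num)]

-- B reduces mask modulo 256 up front
theorem pv_modB (mask a : Int) (ha : ¬ a = 0) :
    rotate_mask_py_alt mask a = rotate_mask_py_alt (mask % 256) a := by
  have hm : PySem.Int.mod mask 256 = PySem.Int.mod (mask % 256) 256 := by
    rw [PySem.Int.mod_eq_emod_of_pos (by norm_num), PySem.Int.mod_eq_emod_of_pos (by norm_num)]
    omega
  simp only [rotate_mask_py_alt, if_neg ha, hm]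

-- ===== VERDICT (by name: the statement is the Claim_ definition above) =====
theorem rotate_mask_py_spec : Claim_equal_rotate_mask_py := by
  intro mask angle _
  unfold Spec_rotate_mask_py
  by_cases h0 : angle = 0
  · subst h0; simp [rotate_mask_py, rotate_mask_py_alt]
  by_cases h123 : angle = 1 ∨ angle = 2 ∨ angle = 3
  · have hr : 0 ≤ mask % 256 ∧ mask % 256 < 256 := by omega
    have hn : ((mask % 256).toNat : Int) = mask % 256 := Int.toNat_of_nonneg hr.1
    have hfin : (mask % 256).toNat < 256 := by omega
    have hk := pv_key ⟨(mask % 256).toNat, hfin⟩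
    rw [pv_modA mask angle h0, pv_modB mask angle h0, ← hn]
    rcases h123 with h | h | h <;> subst h
    · exact hk.1
    · exact hk.2.1
    · exact hk.2.2
  · simp only [not_or] at h123
    obtain ⟨h1, h2, h3⟩ := h123
    rw [rotate_mask_py_alt, if_neg h0, if_neg (by tauto)]
    simp [rotate_mask_py, h0, h1, h2, h3, PySem.List.enumerate]
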